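-- pv_equiv track=rewrite | github.com/Alexamakans/advent-of-code-python | aoc/years/y2017/day02/solver.py | part_one
-- ===== SOURCE A (Python) =====
-- def part_one(input: str) -> str:
--     number_lines = [
--         [int(word) for word in line.split()] for line in input.strip().splitlines()
--     ]
--     checksum_sum = 0
--     for numbers in number_lines:
--         low, high = numbers[0], numbers[0]
--         for value in numbers:
--             if value < low:
--                 low = value
--             if value > high:
--                 high = value
--         checksum_sum += high - low
--     return str(checksum_sum)
-- ===== SOURCE B (Python) =====
-- def part_one(input: str) -> str:
--     total = 0
--     for line in input.strip().splitlines():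
--         ordered = sorted(int(word) for word in line.split())
--         total += ordered[-1] - ordered[0]
--     return str(total)
-- ===== Notes on version B (the rewrite author's own statement) =====
-- stated objective: simpler
-- what changed: Replaces the hand-rolled low/high tracking scan (seeded from numbers[0]) with sorting each row and subtracting its first element from its last, accumulating in a single loop without the intermediate list of rows.
import Mathlib
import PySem

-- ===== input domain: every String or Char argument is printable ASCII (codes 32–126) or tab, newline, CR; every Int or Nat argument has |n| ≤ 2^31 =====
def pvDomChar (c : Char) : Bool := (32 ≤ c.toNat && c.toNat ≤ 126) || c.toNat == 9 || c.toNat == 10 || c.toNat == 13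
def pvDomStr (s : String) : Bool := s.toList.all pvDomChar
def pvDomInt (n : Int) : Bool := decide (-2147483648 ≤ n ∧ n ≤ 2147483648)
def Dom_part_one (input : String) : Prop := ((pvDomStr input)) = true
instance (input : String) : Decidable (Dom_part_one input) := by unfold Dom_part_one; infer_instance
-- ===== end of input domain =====

-- B rewrites A's low/high tracking scan: each row is sorted and its range read off the ends (simpler decomposition, no intermediate list of rows).

-- ===== PORT A =====
-- int(word); inside Pre_ every word parses, so getD 0 is never taken.
def pvParseWord (w : String) : Int := (PySem.Int.ofStr? w).getD 0

def part_one (input : String) : String :=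
  let numberLines : List (List Int) :=
    (PySem.Str.splitlines (PySem.Str.strip input)).map
      (fun line => (PySem.Str.split₀ line).map pvParseWord)
  let checksumSum : Int :=
    numberLines.foldl
      (fun acc numbers =>
        -- numbers[0]; inside Pre_ each row is nonempty, so getD 0 is never taken
        let first : Int := (PySem.List.pyGet? numbers 0).getD 0
        let lh : Int × Int :=
          numbers.foldl
            (fun (p : Int × Int) value =>
              (if value < p.1 then value else p.1,
               if value > p.2 then value else p.2))
            (first, first)
        acc + (lh.2 - lh.1))
      0
  PySem.Int.toStr checksumSum

-- ===== PORT B =====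
def part_one_alt (input : String) : String :=
  let total : Int :=
    (PySem.Str.splitlines (PySem.Str.strip input)).foldl
      (fun total line =>
        let ordered : List Int :=
          PySem.List.sorted ((PySem.Str.split₀ line).map pvParseWord) (fun x => x) false
        -- ordered[-1] and ordered[0]; inside Pre_ each row is nonempty
        total + ((PySem.List.pyGet? ordered (-1)).getD 0 - (PySem.List.pyGet? ordered 0).getD 0))
      0
  PySem.Int.toStr total

-- ===== PRECONDITION & SPEC =====
-- Pre_ excludes exactly the inputs where A raises: a line whose split is empty
-- (IndexError at numbers[0]) or a word int() rejects (ValueError).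
def Pre_part_one (input : String) : Prop :=
  ∀ line ∈ PySem.Str.splitlines (PySem.Str.strip input),
    PySem.Str.split₀ line ≠ [] ∧
    ∀ w ∈ PySem.Str.split₀ line, (PySem.Int.ofStr? w).isSome = true

instance (input : String) : Decidable (Pre_part_one input) := by
  unfold Pre_part_one; infer_instance

def pvWitness_part_one : String := "5 1 9 5\n7 5 3\n2 4 6 8"

def Spec_part_one (input : String) (out : String) : Prop := out = part_one_alt input
instance (input : String) (out : String) : Decidable (Spec_part_one input out) := by unfold Spec_part_one; infer_instance

-- ===== CLAIM (what is proved, stated in full; the proofs are below) =====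
def Claim_equal_part_one : Prop := ∀ (input : String), Dom_part_one input → Pre_part_one input → Spec_part_one input (part_one input)

-- ===== LEMMAS AND PROOFS =====

-- A's pair-fold splits into independent running-min and running-max folds.
theorem pv_fold_pair (xs : List Int) (a b : Int) :
    xs.foldl
      (fun (p : Int × Int) value =>
        (if value < p.1 then value else p.1,
         if value > p.2 then value else p.2))
      (a, b)
    = (xs.foldl (fun m v => if v < m then v else m) a,
       xs.foldl (fun m v => if v > m then v else m) b) := by
  induction xs generalizing a b with
  | nil => rfl
  | cons x t ih => simp only [List.foldl_cons]; exact ih _ _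

theorem pv_foldmin_mem (xs : List Int) (a : Int) :
    xs.foldl (fun m v => if v < m then v else m) a = a ∨
    xs.foldl (fun m v => if v < m then v else m) a ∈ xs := by
  induction xs generalizing a with
  | nil => left; rfl
  | cons x t ih =>
    simp only [List.foldl_cons]
    rcases ih (if x < a then x else a) with h | h
    · rw [h]; split_ifs at h ⊢ <;> simp_all
    · right; simp [h]

theorem pv_foldmin_le (xs : List Int) (a : Int) :
    xs.foldl (fun m v => if v < m then v else m) a ≤ a ∧
    ∀ y ∈ xs, xs.foldl (fun m v => if v < m then v else m) a ≤ y := by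
  induction xs generalizing a with
  | nil => exact ⟨le_refl _, by simp⟩
  | cons x t ih =>
    simp only [List.foldl_cons]
    obtain ⟨h1, h2⟩ := ih (if x < a then x else a)
    refine ⟨?_, ?_⟩
    · split_ifs at h1 ⊢ <;> omega
    · intro y hy
      rcases List.mem_cons.mp hy with rfl | hy
      · split_ifs at h1 ⊢ <;> omega
      · exact h2 y hy

theorem pv_foldmax_mem (xs : List Int) (a : Int) :
    xs.foldl (fun m v => if v > m then v else m) a = a ∨
    xs.foldl (fun m v => if v > m then v else m) a ∈ xs := by
  induction xs generalizing a with
  | nil => left; rfl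
  | cons x t ih =>
    simp only [List.foldl_cons]
    rcases ih (if x > a then x else a) with h | h
    · rw [h]; split_ifs at h ⊢ <;> simp_all
    · right; simp [h]

theorem pv_foldmax_ge (xs : List Int) (a : Int) :
    a ≤ xs.foldl (fun m v => if v > m then v else m) a ∧
    ∀ y ∈ xs, y ≤ xs.foldl (fun m v => if v > m then v else m) a := by
  induction xs generalizing a with
  | nil => exact ⟨le_refl _, by simp⟩
  | cons x t ih =>
    simp only [List.foldl_cons]
    obtain ⟨h1, h2⟩ := ih (if x > a then x else a)
    refine ⟨?_, ?_⟩
    · split_ifs at h1 ⊢ <;> omega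
    · intro y hy
      rcases List.mem_cons.mp hy with rfl | hy
      · split_ifs at h1 ⊢ <;> omega
      · exact h2 y hy

-- last element of the sorted list bounds every member from above
theorem pv_sorted_last_ge (xs : List Int) (y : Int)
    (hy : y ∈ PySem.List.sorted xs (fun x => x) false) :
    y ≤ (PySem.List.sorted xs (fun x => x) false).getLast?.getD 0 := by
  obtain ⟨p, hp, hpy⟩ := List.mem_iff_getElem.mp hy
  have hne : PySem.List.sorted xs (fun x => x) false ≠ [] := List.ne_nil_of_mem hy
  have hlen : 0 < (PySem.List.sorted xs (fun x => x) false).length :=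
    List.length_pos_iff.mpr hne
  have hlast : (PySem.List.sorted xs (fun x => x) false).getLast? =
      some (PySem.List.sorted xs (fun x => x) false)[(PySem.List.sorted xs (fun x => x) false).length - 1] := by
    rw [List.getLast?_eq_getElem?, List.getElem?_eq_getElem (by omega)]
  rw [hlast]
  have := PySem.List.key_sorted_getElem_mono (xs := xs) (key := fun x => x)
    (p := p) (q := (PySem.List.sorted xs (fun x => x) false).length - 1) (by omega) (by omega)
  simpa [hpy] using this

-- the per-line contributions of the two ports agree on nonempty rows
theorem pv_line_eq (numbers : List Int) (hne : numbers ≠ []) :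
    (let first : Int := (PySem.List.pyGet? numbers 0).getD 0
     let lh : Int × Int :=
       numbers.foldl
         (fun (p : Int × Int) value =>
           (if value < p.1 then value else p.1,
            if value > p.2 then value else p.2))
         (first, first)
     lh.2 - lh.1)
    = ((PySem.List.pyGet? (PySem.List.sorted numbers (fun x => x) false) (-1)).getD 0
       - (PySem.List.pyGet? (PySem.List.sorted numbers (fun x => x) false) 0).getD 0) := by
  obtain ⟨n0, t, rfl⟩ := List.exists_cons_of_ne_nil hne
  simp only [PySem.List.pyGet?_zero_cons, Option.getD_some, pv_fold_pair]
  set xs : List Int := n0 :: t with hxs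
  set s := PySem.List.sorted xs (fun x => x) false with hs
  have hsne : s ≠ [] := by
    rw [hs, Ne, PySem.List.sorted_eq_nil_iff]; exact hne
  obtain ⟨m, st, hcons⟩ := List.exists_cons_of_ne_nil hsne
  have hmem_s : ∀ y : Int, y ∈ s ↔ y ∈ xs := by
    intro y; rw [hs]; exact PySem.List.mem_sorted xs (fun x => x) false y
  -- head of sorted = the running minimum
  have hmle : ∀ y ∈ xs, m ≤ y :=
    PySem.List.key_head_sorted_le xs (fun x => x) (hs.symm.trans hcons)
  have hmmem : m ∈ xs := (hmem_s m).mp (hcons ▸ List.mem_cons_self)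
  have hminmem := pv_foldmin_mem xs n0
  have hminle := pv_foldmin_le xs n0
  have hmin : xs.foldl (fun m v => if v < m then v else m) n0 = m := by
    have h1 : m ≤ xs.foldl (fun m v => if v < m then v else m) n0 := by
      rcases hminmem with h | h
      · rw [h]; exact hmle n0 (by simp [hxs])
      · exact hmle _ h
    have h2 : xs.foldl (fun m v => if v < m then v else m) n0 ≤ m :=
      hminle.2 m hmmem
    omega
  -- last of sorted = the running maximum
  set L := s.getLast?.getD 0 with hL
  have hLge : ∀ y ∈ xs, y ≤ L := by
    intro y hy
    have := pv_sorted_last_ge xs y (by rw [← hs]; exact (hmem_s y).mpr hy)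
    rw [← hs] at this
    exact this
  have hLmem : L ∈ xs := by
    have hgl : s.getLast? = some (s.getLast hsne) := List.getLast?_eq_some_getLast hsne
    have hLe : L = s.getLast hsne := by rw [hL, hgl]; rfl
    exact (hmem_s _).mp (hLe ▸ List.getLast_mem hsne)
  have hmaxmem := pv_foldmax_mem xs n0
  have hmaxge := pv_foldmax_ge xs n0
  have hmax : xs.foldl (fun m v => if v > m then v else m) n0 = L := by
    have h1 : xs.foldl (fun m v => if v > m then v else m) n0 ≤ L := by
      rcases hmaxmem with h | h
      · rw [h]; exact hLge n0 (by simp [hxs])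
      · exact hLge _ h
    have h2 : L ≤ xs.foldl (fun m v => if v > m then v else m) n0 :=
      hmaxge.2 L hLmem
    omega
  have h0 : PySem.List.pyGet? s 0 = some m := by
    rw [hcons]; exact PySem.List.pyGet?_zero_cons m st
  rw [hmin, hmax, PySem.List.pyGet?_neg_one, h0, ← hL, Option.getD_some]

-- the whole loop: A's fold over the parsed rows equals B's fold over the raw lines
theorem pv_outer (lines : List String) (acc : Int)
    (h : ∀ line ∈ lines, (PySem.Str.split₀ line).map pvParseWord ≠ []) :
    List.foldl
      (fun acc numbers =>
        let first : Int := (PySem.List.pyGet? numbers 0).getD 0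
        let lh : Int × Int :=
          numbers.foldl
            (fun (p : Int × Int) value =>
              (if value < p.1 then value else p.1,
               if value > p.2 then value else p.2))
            (first, first)
        acc + (lh.2 - lh.1))
      acc (lines.map (fun line => (PySem.Str.split₀ line).map pvParseWord))
    = List.foldl
      (fun total line =>
        let ordered : List Int :=
          PySem.List.sorted ((PySem.Str.split₀ line).map pvParseWord) (fun x => x) false
        total + ((PySem.List.pyGet? ordered (-1)).getD 0 - (PySem.List.pyGet? ordered 0).getD 0))
      acc lines := by
  induction lines generalizing acc with
  | nil => rfl
  | cons l t ih =>
    simp only [List.map_cons, List.foldl_cons]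
    rw [congrArg (acc + ·) (pv_line_eq _ (h l List.mem_cons_self))]
    exact ih _ (fun line hl => h line (List.mem_cons_of_mem _ hl))

-- ===== VERDICT (by name: the statement is the Claim_ definition above) =====
theorem part_one_spec : Claim_equal_part_one := by
  intro input _hdom hpre
  unfold Spec_part_one part_one part_one_alt
  refine congrArg PySem.Int.toStr ?_
  exact pv_outer _ 0 (fun line hl => by simpa using (hpre line hl).1)
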